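-- pv_equiv track=rewrite | github.com/AndrewJGaut/SchemaBasedExtraction | ParseAMTData/AnnotaterAgreement.py | get_agreement_pairwise
-- ===== SOURCE A (Python) =====
-- import itertools
--
-- def get_agreement_pairwise(matrix):
--     num_agreements = 0
--     x = range(len(matrix))
--     combos = itertools.combinations(x, 2)
--     for combo in combos:
--         rater1 = combo[0]
--         rater2 = combo[1]
--         for j in range(len(matrix[0])):
--             if matrix[rater1][j] == matrix[rater2][j]:
--                 num_agreements += 1
--
--     return num_agreements
-- ===== SOURCE B (Python) =====
-- def get_agreement_pairwise(matrix):
--     # Per column, count value frequencies once and sum C(count, 2),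
--     # instead of comparing every pair of raters.
--     if not matrix:
--         return 0
--     total = 0
--     for j in range(len(matrix[0])):
--         counts = {}
--         for row in matrix:
--             v = row[j]
--             counts[v] = counts.get(v, 0) + 1
--         for c in counts.values():
--             total += c * (c - 1) // 2
--     return total
-- ===== Notes on version B (the rewrite author's own statement) =====
-- stated objective: faster
-- what changed: Instead of comparing every pair of raters in every column (O(R^2*C)), B makes one pass per column building a value-frequency dictionary and sums C(count,2) over the frequencies (O(R*C)).
import Mathlib
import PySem

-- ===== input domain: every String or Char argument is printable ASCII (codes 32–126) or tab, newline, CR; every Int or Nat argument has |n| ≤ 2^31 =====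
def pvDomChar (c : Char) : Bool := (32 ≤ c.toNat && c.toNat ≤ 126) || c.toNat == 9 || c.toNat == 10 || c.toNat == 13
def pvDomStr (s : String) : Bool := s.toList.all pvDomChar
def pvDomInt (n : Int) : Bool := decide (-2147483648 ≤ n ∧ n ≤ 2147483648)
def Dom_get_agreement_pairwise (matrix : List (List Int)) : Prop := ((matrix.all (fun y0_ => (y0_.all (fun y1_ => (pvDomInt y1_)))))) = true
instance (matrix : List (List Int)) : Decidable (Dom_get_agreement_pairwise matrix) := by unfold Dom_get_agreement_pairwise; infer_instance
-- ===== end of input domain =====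

-- B replaces A's scan over all pairs of raters by one frequency-counting pass per column,
-- summing C(count,2) over each column's value frequencies (objective: faster, asymptotic).

-- ===== PORT A =====
def get_agreement_pairwise (matrix : List (List Int)) : Int :=
  (PySem.List.combinations (PySem.List.pyRange 0 (matrix.length : Int) 1) 2).foldl
    (fun num_agreements combo =>
      let rater1 := PySem.List.pyGetD combo 0 0
      let rater2 := PySem.List.pyGetD combo 1 0
      (PySem.List.pyRange 0 ((PySem.List.pyGetD matrix 0 []).length : Int) 1).foldl
        (fun acc j =>
          if PySem.List.pyGetD (PySem.List.pyGetD matrix rater1 []) j 0 =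
             PySem.List.pyGetD (PySem.List.pyGetD matrix rater2 []) j 0
          then acc + 1 else acc)
        num_agreements)
    0

-- ===== PORT B =====
def get_agreement_pairwise_alt (matrix : List (List Int)) : Int :=
  if matrix = [] then 0
  else
    (PySem.List.pyRange 0 ((PySem.List.pyGetD matrix 0 []).length : Int) 1).foldl
      (fun total j =>
        let counts : PySem.Dict Int Int := matrix.foldl
          (fun d row =>
            let v := PySem.List.pyGetD row j 0
            d.insert v (d.getD v 0 + 1))
          PySem.Dict.empty
        counts.values.foldl (fun t c => t + PySem.Int.floordiv (c * (c - 1)) 2) total)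
      0

-- ===== PRECONDITION & SPEC =====
-- A raises IndexError exactly when some row is shorter than row 0 (and there are ≥ 2 rows,
-- which the condition below implies); Pre_ excludes exactly those ragged matrices, on which B raises too.
def Pre_get_agreement_pairwise (matrix : List (List Int)) : Prop :=
  ∀ row ∈ matrix, (matrix.headD []).length ≤ row.length
instance (matrix : List (List Int)) : Decidable (Pre_get_agreement_pairwise matrix) := by
  unfold Pre_get_agreement_pairwise; infer_instance
def pvWitness_get_agreement_pairwise : List (List Int) := [[1, 2], [1, 3], [0, 2]]

def Spec_get_agreement_pairwise (matrix : List (List Int)) (out : Int) : Prop := out = get_agreement_pairwise_alt matrix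
instance (matrix : List (List Int)) (out : Int) : Decidable (Spec_get_agreement_pairwise matrix out) := by unfold Spec_get_agreement_pairwise; infer_instance

-- ===== CLAIM (what is proved, stated in full; the proofs are below) =====
def Claim_equal_get_agreement_pairwise : Prop := ∀ (matrix : List (List Int)), Dom_get_agreement_pairwise matrix → Pre_get_agreement_pairwise matrix → Spec_get_agreement_pairwise matrix (get_agreement_pairwise matrix)

-- ===== LEMMAS AND PROOFS =====

/-- Sum of `G x y` over all index-ordered pairs of `l`. -/
def pairAgg {α : Type} (G : α → α → Int) : List α → Int
  | [] => 0
  | x :: t => (t.map (G x)).sum + pairAgg G t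

/-- `c*(c-1)//2`, the per-value agreement count. -/
def gZ (c : Int) : Int := PySem.Int.floordiv (c * (c - 1)) 2

theorem gZ_succ (c : Int) : gZ (c + 1) = gZ c + c := by
  obtain ⟨k, hk⟩ := Int.even_mul_succ_self (c - 1)
  have h1 : c * (c - 1) = 2 * k := by nlinarith [hk]
  have h2 : (c + 1) * (c + 1 - 1) = 2 * (k + c) := by nlinarith [hk]
  unfold gZ
  rw [h1, h2, PySem.Int.floordiv_eq_ediv_of_pos (by norm_num),
    PySem.Int.floordiv_eq_ediv_of_pos (by norm_num),
    Int.mul_ediv_cancel_left _ (by norm_num), Int.mul_ediv_cancel_left _ (by norm_num)]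

theorem sum_combos2 {α : Type} (G : α → α → Int) (F : List α → Int)
    (h : ∀ a b, F [a, b] = G a b) (l : List α) :
    ((PySem.List.combinations l 2).map F).sum = pairAgg G l := by
  induction l with
  | nil => simp [PySem.List.combinations_nil_succ, pairAgg]
  | cons x t ih =>
    rw [PySem.List.combinations_cons_succ, PySem.List.combinations_one]
    simp [pairAgg, ← ih, List.map_map, Function.comp_def, h]

theorem pairAgg_map {α β : Type} (f : α → β) (H : β → β → Int) (l : List α) :
    pairAgg (fun a b => H (f a) (f b)) l = pairAgg H (l.map f) := by
  induction l with
  | nil => rfl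
  | cons x t ih => simp [pairAgg, ih, List.map_map, Function.comp_def]

theorem sum_map_sum_comm {α β : Type} (l1 : List α) (l2 : List β) (g : α → β → Int) :
    (l1.map (fun a => (l2.map (g a)).sum)).sum
      = (l2.map (fun b => (l1.map (fun a => g a b)).sum)).sum := by
  induction l1 with
  | nil => simp
  | cons x t ih => simp only [List.map_cons, List.sum_cons, ih, PySem.List.sum_map_add_int]

theorem pairAgg_sum_swap {α β : Type} (J : List β) (E : α → α → β → Int) (l : List α) :
    pairAgg (fun a b => (J.map (E a b)).sum) l
      = (J.map (fun j => pairAgg (fun a b => E a b j) l)).sum := by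
  induction l with
  | nil => simp [pairAgg]
  | cons x t ih =>
    simp only [pairAgg, ih, sum_map_sum_comm t J (fun y j => E x y j),
      PySem.List.sum_map_add_int]

theorem sum_ind_eq_count (x : Int) (t : List Int) :
    (t.map (fun y => if x = y then (1 : Int) else 0)).sum = (t.count x : Int) := by
  induction t with
  | nil => simp
  | cons y t ih =>
    simp only [List.map_cons, List.sum_cons, ih, List.count_cons]
    push_cast
    by_cases h : x = y
    · subst h; simp
      omega
    · simp [h, Ne.symm h]

/-- Finset form of the per-column score. -/
def colR (xs : List Int) : Int := ∑ v ∈ xs.toFinset, gZ (xs.count v : Int)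

theorem colR_cons (x : Int) (t : List Int) : colR (x :: t) = (t.count x : Int) + colR t := by
  unfold colR
  by_cases hx : x ∈ t
  · have hfin : (x :: t).toFinset = t.toFinset := by
      simp [List.toFinset_cons, Finset.insert_eq_self.mpr (List.mem_toFinset.mpr hx)]
    rw [hfin]
    have hxf : x ∈ t.toFinset := List.mem_toFinset.mpr hx
    rw [← Finset.sum_erase_add _ _ hxf, ← Finset.sum_erase_add _ (fun v => gZ ((t.count v : Nat) : Int)) hxf]
    have hsame : ∑ v ∈ t.toFinset.erase x, gZ (((x :: t).count v : Nat) : Int)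
        = ∑ v ∈ t.toFinset.erase x, gZ ((t.count v : Nat) : Int) := by
      refine Finset.sum_congr rfl fun v hv => ?_
      have hne : v ≠ x := (Finset.mem_erase.mp hv).1
      simp [Ne.symm hne]
    have hcx : (((x :: t).count x : Nat) : Int) = (t.count x : Int) + 1 := by
      rw [List.count_cons_self]; push_cast; ring
    rw [hsame, hcx, gZ_succ]
    ring
  · have hfin : (x :: t).toFinset = insert x t.toFinset := List.toFinset_cons
    rw [hfin, Finset.sum_insert (by simpa using hx)]
    have hc0 : t.count x = 0 := List.count_eq_zero_of_not_mem hx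
    have hcx : ((x :: t).count x : Nat) = 1 := by simp [List.count_cons_self, hc0]
    have hsame : ∑ v ∈ t.toFinset, gZ (((x :: t).count v : Nat) : Int)
        = ∑ v ∈ t.toFinset, gZ ((t.count v : Nat) : Int) := by
      refine Finset.sum_congr rfl fun v hv => ?_
      have hne : v ≠ x := by rintro rfl; exact hx (List.mem_toFinset.mp hv)
      simp [Ne.symm hne]
    rw [hcx, hsame, hc0]
    have h1 : gZ ((1 : Nat) : Int) = 0 := by decide
    rw [h1]
    push_cast
    ring

theorem pairAgg_ind_eq_colR (xs : List Int) :
    pairAgg (fun a b => if a = b then (1 : Int) else 0) xs = colR xs := by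
  induction xs with
  | nil => simp [pairAgg, colR]
  | cons x t ih => rw [pairAgg, sum_ind_eq_count, ih, colR_cons]

/-- The per-column score as B computes it: over distinct values in first-occurrence order. -/
theorem colR_eq_ofList_sum (xs : List Int) :
    ((PySem.Set.ofList xs).map (fun k => gZ (xs.count k : Int))).sum = colR xs := by
  unfold colR
  have hnd : (PySem.Set.ofList xs).Nodup := PySem.Set.nodup_ofList xs
  have hfin : (PySem.Set.ofList xs).toFinset = xs.toFinset := by
    ext v; simp [List.mem_toFinset, PySem.Set.mem_ofList]
  rw [← hfin, List.sum_toFinset _ hnd]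

theorem colA_eq (matrix : List (List Int)) (j : Int) :
    pairAgg (fun r1 r2 => if PySem.List.pyGetD r1 j 0 = PySem.List.pyGetD r2 j 0 then (1 : Int) else 0) matrix
      = colR (matrix.map (fun row => PySem.List.pyGetD row j 0)) := by
  rw [pairAgg_map (f := fun row => PySem.List.pyGetD row j 0)
        (H := fun a b => if a = b then (1 : Int) else 0),
      pairAgg_ind_eq_colR]

theorem colB_eq (matrix : List (List Int)) (j : Int) :
    ((matrix.foldl (fun (d : PySem.Dict Int Int) row =>
        d.insert (PySem.List.pyGetD row j 0) (d.getD (PySem.List.pyGetD row j 0) 0 + 1))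
        PySem.Dict.empty).values.map (fun c => PySem.Int.floordiv (c * (c - 1)) 2)).sum
      = colR (matrix.map (fun row => PySem.List.pyGetD row j 0)) := by
  rw [← List.foldl_map (f := fun row => PySem.List.pyGetD row j 0)
        (g := fun (d : PySem.Dict Int Int) v => d.insert v (d.getD v 0 + 1)),
      PySem.Dict.foldl_insert_getD_add_one_eq_counter, ← colR_eq_ofList_sum]
  simp [PySem.Dict.values, PySem.Dict.items_counter, List.map_map, Function.comp_def, gZ]

theorem ports_eq (matrix : List (List Int)) :
    get_agreement_pairwise matrix = get_agreement_pairwise_alt matrix := by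
  by_cases hm : matrix = []
  · subst hm; decide
  · unfold get_agreement_pairwise get_agreement_pairwise_alt
    rw [if_neg hm]
    have hIf : ∀ (P : Prop) (inst : Decidable P) (acc : Int),
        (if P then acc + 1 else acc) = acc + (if P then 1 else 0) := by
      intro P inst acc; split <;> ring
    simp only [hIf, PySem.List.foldl_add, zero_add]
    rw [sum_combos2
        (G := fun i1 i2 => ((PySem.List.pyRange 0 ((PySem.List.pyGetD matrix 0 []).length : Int) 1).map
          (fun j => if PySem.List.pyGetD (PySem.List.pyGetD matrix i1 []) j 0
              = PySem.List.pyGetD (PySem.List.pyGetD matrix i2 []) j 0 then (1 : Int) else 0)).sum)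
        (h := fun a b => rfl),
      pairAgg_map (f := fun i => PySem.List.pyGetD matrix i [])
        (H := fun r1 r2 => ((PySem.List.pyRange 0 ((PySem.List.pyGetD matrix 0 []).length : Int) 1).map
          (fun j => if PySem.List.pyGetD r1 j 0 = PySem.List.pyGetD r2 j 0 then (1 : Int) else 0)).sum),
      PySem.List.map_pyGetD_pyRange_zero' matrix [],
      pairAgg_sum_swap (E := fun r1 r2 j =>
        if PySem.List.pyGetD r1 j 0 = PySem.List.pyGetD r2 j 0 then (1 : Int) else 0)]
    refine congrArg List.sum (List.map_congr_left fun j hj => ?_)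
    rw [colA_eq, colB_eq]

-- ===== VERDICT (by name: the statement is the Claim_ definition above) =====
theorem get_agreement_pairwise_spec : Claim_equal_get_agreement_pairwise := by
  intro matrix _ _
  unfold Spec_get_agreement_pairwise
  exact ports_eq matrix
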